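-- pv_equiv track=rewrite | github.com/WaShindeiru/Algorithms-AGH | lab12/StringSearch.py | rolling_hash_comparison
-- ===== SOURCE A (Python) =====
-- def hash(word):
--     hw = 0
--     word_len = len(word)
--     d = 256
--     q = 101
--
--     for i in range(word_len):
--         hw = (hw*d + ord(word[i])) % q
--
--     return hw
--
-- def rolling_hash_comparison(text, pattern):
--     d = 256
--     q = 101
--
--     text_len = len(text)
--     pattern_len = len(pattern)
--     pattern_hash = hash(pattern)
--
--     h = 1
--     for i in range(pattern_len - 1):
--         h = (h*d) % q
--
--     comparison_count = 0
--     answer_count = 0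
--     collision_count = 0
--
--     text_hash = hash(text[0: pattern_len: 1])
--
--     for m in range(0, text_len - pattern_len + 1, 1):
--         comparison_count += 1
--         if text_hash == pattern_hash:
--             if pattern == text[m : m+pattern_len : 1]:
--                 answer_count += 1
--             else:
--                 collision_count += 1
--
--         if m + pattern_len < text_len:
--             text_hash = (d * (text_hash - ord(text[m]) * h) + ord(text[m + pattern_len])) % q
--             if text_hash < 0:
--                 text_hash += q
--
--     return answer_count, comparison_count, collision_count
-- ===== SOURCE B (Python) =====
-- def rolling_hash_comparison(text, pattern):
--     d = 256
--     q = 101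
--     n = len(text)
--     m = len(pattern)
--     if m == 0:
--         # every empty window matches both by hash and by content
--         return n + 1, n + 1, 0
--     windows = n - m + 1
--     if windows <= 0:
--         return 0, 0, 0
--
--     pattern_hash = 0
--     for c in pattern:
--         pattern_hash = (pattern_hash * d + ord(c)) % q
--
--     h = pow(d, m - 1, q)
--
--     # one rolling pass counting hash matches only
--     th = 0
--     for c in text[:m]:
--         th = (th * d + ord(c)) % q
--     hash_matches = 0
--     for i in range(windows):
--         if th == pattern_hash:
--             hash_matches += 1
--         if i + m < n:
--             th = (d * (th - ord(text[i]) * h) + ord(text[i + m])) % q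
--
--     # true matches counted separately over all windows
--     answers = sum(1 for i in range(windows) if text[i:i + m] == pattern)
--
--     return answers, windows, hash_matches - answers
-- ===== Notes on version B (the rewrite author's own statement) =====
-- stated objective: alternative
-- what changed: A's single fused Rabin-Karp loop (hash check with nested substring compare and interleaved counter updates) is split into a pure rolling-hash pass that only counts hash matches, an independent direct count of true window matches, and collisions obtained by subtraction, with the window count in closed form, pow(d,m-1,q) instead of a multiply loop, and the degenerate empty pattern handled up front.
-- intended difference: On an empty pattern with nonempty text, A's answer count comes from stale rolling-hash state (it keeps updating the hash past empty windows and only counts windows where that leftover hash is 0, e.g. ('a','') gives (1,2,0)), while B returns (len(text)+1, len(text)+1, 0) since every empty window genuinely matches the empty pattern — the intended value. — e.g. on rolling_hash_comparison("a", ""): A returns [1, 2, 0], B returns [2, 2, 0]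
import Mathlib
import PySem

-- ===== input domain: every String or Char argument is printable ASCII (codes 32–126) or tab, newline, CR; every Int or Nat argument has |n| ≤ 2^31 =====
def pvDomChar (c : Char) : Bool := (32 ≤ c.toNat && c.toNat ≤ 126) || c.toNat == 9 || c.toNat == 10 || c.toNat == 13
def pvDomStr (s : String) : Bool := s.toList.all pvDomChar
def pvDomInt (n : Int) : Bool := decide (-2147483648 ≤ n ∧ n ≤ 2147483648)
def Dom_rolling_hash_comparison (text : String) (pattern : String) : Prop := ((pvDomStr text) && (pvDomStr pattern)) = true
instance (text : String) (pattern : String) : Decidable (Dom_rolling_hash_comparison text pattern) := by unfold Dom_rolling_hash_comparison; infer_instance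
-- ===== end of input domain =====

-- B splits A's fused Rabin-Karp loop into a pure rolling-hash pass plus a separate direct
-- window-match count (collisions by subtraction), handling the empty pattern up front;
-- objective: alternative decomposition; on empty pattern with nonempty text B returns the
-- intended count (see D_) where A's stale rolling state undercounts.

-- ===== PORT A =====
-- hash(word): the Python loop indexes word[i] for i in range(len(word)); folding over the
-- characters visits the same values in the same order.
def pyHash (word : List Char) : Int :=
  word.foldl (fun hw c => PySem.Int.mod (hw * 256 + (c.toNat : Int)) 101) 0

-- the body of A's main loop (the indices text[m], text[m+pattern_len] are read only under
-- guards that make them in range, so pyGetD is exact there)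
def stepA (t p : List Char) (ph h : Int) (s : Int × Int × Int × Int) (mi : Int) :
    Int × Int × Int × Int :=
  let comp := s.2.1 + 1
  let ac : Int × Int :=
    if s.2.2.2 = ph then
      if p = PySem.List.slice t (some mi) (some (mi + (p.length : Int))) then
        (s.1 + 1, s.2.2.1)
      else (s.1, s.2.2.1 + 1)
    else (s.1, s.2.2.1)
  let th : Int :=
    if mi + (p.length : Int) < (t.length : Int) then
      let th' := PySem.Int.mod
        (256 * (s.2.2.2 - ((PySem.List.pyGetD t mi ' ').toNat : Int) * h) +
          ((PySem.List.pyGetD t (mi + (p.length : Int)) ' ').toNat : Int)) 101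
      if th' < 0 then th' + 101 else th'
    else s.2.2.2
  (ac.1, comp, ac.2, th)

def rolling_hash_comparison_core (t p : List Char) : List Int :=
  let n : Int := t.length
  let m : Int := p.length
  let ph := pyHash p
  let h := (PySem.List.pyRange 0 (m - 1)).foldl (fun hh _ => PySem.Int.mod (hh * 256) 101) 1
  let th0 := pyHash (PySem.List.slice t (some 0) (some m))
  let s := (PySem.List.pyRange 0 (n - m + 1)).foldl (stepA t p ph h) (0, 0, 0, th0)
  [s.1, s.2.1, s.2.2.1]

def rolling_hash_comparison (text : String) (pattern : String) : List Int :=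
  rolling_hash_comparison_core text.toList pattern.toList

-- ===== PORT B =====
-- the body of B's rolling pass: counts hash matches only
def stepB (t : List Char) (m ph h : Int) (s : Int × Int) (i : Int) : Int × Int :=
  let hm := if s.2 = ph then s.1 + 1 else s.1
  let th : Int :=
    if i + m < (t.length : Int) then
      PySem.Int.mod
        (256 * (s.2 - ((PySem.List.pyGetD t i ' ').toNat : Int) * h) +
          ((PySem.List.pyGetD t (i + m) ' ').toNat : Int)) 101
    else s.2
  (hm, th)

def rolling_hash_comparison_alt_core (t p : List Char) : List Int :=
  let n : Int := t.length
  let m : Int := p.length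
  if m = 0 then [n + 1, n + 1, 0]   -- every empty window matches by hash and by content
  else
    let windows := n - m + 1
    if windows ≤ 0 then [0, 0, 0]
    else
      let ph := p.foldl (fun a c => PySem.Int.mod (a * 256 + (c.toNat : Int)) 101) 0
      let h := PySem.Int.powMod 256 (p.length - 1) 101   -- pow(d, m-1, q)
      let th0 := (PySem.List.slice t none (some m)).foldl
        (fun a c => PySem.Int.mod (a * 256 + (c.toNat : Int)) 101) 0
      let r := (PySem.List.pyRange 0 windows).foldl (stepB t m ph h) (0, th0)
      let answers := ((PySem.List.pyRange 0 windows).map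
        (fun i => if PySem.List.slice t (some i) (some (i + m)) = p then (1 : Int) else 0)).sum
      [answers, windows, r.1 - answers]

def rolling_hash_comparison_alt (text : String) (pattern : String) : List Int :=
  rolling_hash_comparison_alt_core text.toList pattern.toList

-- ===== PRECONDITION & SPEC =====
-- On an empty pattern with nonempty text, A returns an answer count driven by stale rolling-hash
-- state (it keeps updating the hash past empty windows), while B returns len(text)+1, the number
-- of empty windows, each of which genuinely matches the empty pattern — the intended value.
def D_rolling_hash_comparison (text : String) (pattern : String) : Prop :=
  pattern = "" ∧ text ≠ ""
instance (text : String) (pattern : String) : Decidable (D_rolling_hash_comparison text pattern) := by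
  unfold D_rolling_hash_comparison; infer_instance

def Spec_rolling_hash_comparison (text : String) (pattern : String) (out : List Int) : Prop :=
  ¬ D_rolling_hash_comparison text pattern → out = rolling_hash_comparison_alt text pattern
instance (text : String) (pattern : String) (out : List Int) :
    Decidable (Spec_rolling_hash_comparison text pattern out) := by
  unfold Spec_rolling_hash_comparison; infer_instance

def pvDiffWitness_rolling_hash_comparison : String × String := ("a", "")
def pvDiffWitnessOut_rolling_hash_comparison : (List Int) × (List Int) := ([1, 2, 0], [2, 2, 0])

-- ===== CLAIM (what is proved, stated in full; the proofs are below) =====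
def Claim_unchanged_rolling_hash_comparison : Prop := ∀ (text : String) (pattern : String), Dom_rolling_hash_comparison text pattern → Spec_rolling_hash_comparison text pattern (rolling_hash_comparison text pattern)
def Claim_changed_rolling_hash_comparison : Prop := Dom_rolling_hash_comparison (pvDiffWitness_rolling_hash_comparison.1) (pvDiffWitness_rolling_hash_comparison.2) ∧ D_rolling_hash_comparison (pvDiffWitness_rolling_hash_comparison.1) (pvDiffWitness_rolling_hash_comparison.2) ∧ rolling_hash_comparison (pvDiffWitness_rolling_hash_comparison.1) (pvDiffWitness_rolling_hash_comparison.2) = pvDiffWitnessOut_rolling_hash_comparison.1 ∧ rolling_hash_comparison_alt (pvDiffWitness_rolling_hash_comparison.1) (pvDiffWitness_rolling_hash_comparison.2) = pvDiffWitnessOut_rolling_hash_comparison.2 ∧ pvDiffWitnessOut_rolling_hash_comparison.1 ≠ pvDiffWitnessOut_rolling_hash_comparison.2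

-- ===== LEMMAS AND PROOFS =====

def HZ (l : List Char) : ZMod 101 := l.foldl (fun a c => a * 256 + (c.toNat : ZMod 101)) 0

theorem castEmod (a : Int) : ((a % (101:Int) : Int) : ZMod 101) = (a : ZMod 101) := by
  rw [ZMod.intCast_eq_intCast_iff]
  exact Int.emod_emod_of_dvd a dvd_rfl

theorem castMod (a : Int) : ((PySem.Int.mod a 101 : Int) : ZMod 101) = (a : ZMod 101) := by
  rw [PySem.Int.mod_eq_emod_of_pos (by norm_num)]; exact castEmod a


theorem foldl_bounds (l : List Char) (a : Int) (h0 : 0 ≤ a) (h1 : a < 101) :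
    0 ≤ l.foldl (fun hw c => PySem.Int.mod (hw * 256 + (c.toNat : Int)) 101) a ∧
    l.foldl (fun hw c => PySem.Int.mod (hw * 256 + (c.toNat : Int)) 101) a < 101 := by
  induction l generalizing a with
  | nil => exact ⟨h0, h1⟩
  | cons c l ih =>
      exact ih _ (PySem.Int.mod_nonneg _ (by norm_num)) (PySem.Int.mod_lt _ (by norm_num))

theorem pyHash_bounds' (l : List Char) : 0 ≤ pyHash l ∧ pyHash l < 101 :=
  foldl_bounds l 0 le_rfl (by norm_num)

theorem foldl_cast (l : List Char) (a : Int) :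
    ((l.foldl (fun hw c => PySem.Int.mod (hw * 256 + (c.toNat : Int)) 101) a : Int) : ZMod 101)
      = l.foldl (fun x c => x * 256 + (c.toNat : ZMod 101)) (a : ZMod 101) := by
  induction l generalizing a with
  | nil => rfl
  | cons c l ih =>
      simp only [List.foldl_cons]
      rw [ih, castMod]
      push_cast
      ring_nf

theorem pyHash_cast (l : List Char) : ((pyHash l : Int) : ZMod 101) = HZ l := by
  unfold pyHash HZ
  rw [foldl_cast l 0]
  norm_num

theorem HZ_general (l : List Char) (a : ZMod 101) :
    l.foldl (fun x c => x * 256 + (c.toNat : ZMod 101)) a = a * 256 ^ l.length + HZ l := by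
  induction l generalizing a with
  | nil => simp [HZ]
  | cons c l ih =>
      simp only [List.foldl_cons, List.length_cons]
      rw [ih, show HZ (c :: l) = (l.foldl (fun x c => x * 256 + (c.toNat : ZMod 101)) ((0:ZMod 101) * 256 + c.toNat)) from rfl, ih]
      ring

theorem HZ_cons (c : Char) (l : List Char) :
    HZ (c :: l) = (c.toNat : ZMod 101) * 256 ^ l.length + HZ l := by
  rw [show HZ (c :: l) = (l.foldl (fun x c => x * 256 + (c.toNat : ZMod 101)) ((0:ZMod 101) * 256 + c.toNat)) from rfl, HZ_general]
  ring

theorem HZ_append_singleton (l : List Char) (c : Char) :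
    HZ (l ++ [c]) = HZ l * 256 + (c.toNat : ZMod 101) := by
  unfold HZ
  rw [List.foldl_append]
  rfl

theorem intEq_of_castEq {x y : Int} (hx0 : 0 ≤ x) (hx1 : x < 101) (hy0 : 0 ≤ y) (hy1 : y < 101)
    (h : (x : ZMod 101) = (y : ZMod 101)) : x = y := by
  rw [ZMod.intCast_eq_intCast_iff] at h
  have hx := Int.emod_eq_of_lt hx0 (by exact_mod_cast hx1)
  have hy := Int.emod_eq_of_lt hy0 (by exact_mod_cast hy1)
  have : x % 101 = y % 101 := h
  omega

def winT (t : List Char) (M i : Nat) : List Char := (t.drop i).take M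

theorem winT_cons (t : List Char) (M i : Nat) (hM : 1 ≤ M) (hi : i + M ≤ t.length) :
    winT t M i = t[i]'(by omega) :: (t.drop (i+1)).take (M-1) := by
  obtain ⟨K, rfl⟩ : ∃ K, M = K + 1 := ⟨M - 1, by omega⟩
  unfold winT
  rw [List.drop_eq_getElem_cons (by omega), List.take_succ_cons]
  simp

theorem winT_snoc (t : List Char) (M i : Nat) (hM : 1 ≤ M) (hi : i + M < t.length) :
    winT t M (i+1) = (t.drop (i+1)).take (M-1) ++ [t[i+M]'(by omega)] := by
  obtain ⟨K, rfl⟩ : ∃ K, M = K + 1 := ⟨M - 1, by omega⟩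
  unfold winT
  rw [List.take_add_one]
  simp only [Nat.add_sub_cancel]
  congr 1
  rw [List.getElem?_drop]
  rw [show i + 1 + K = i + (K + 1) by omega]
  simp [hi]

theorem len_mid (t : List Char) (M i : Nat) (hi : i + M ≤ t.length) :
    ((t.drop (i+1)).take (M-1)).length = M - 1 := by
  simp
  omega


theorem rollStep (t : List Char) (M i : Nat) (hM : 1 ≤ M) (hi : i + M < t.length) :
    PySem.Int.mod
      (256 * (pyHash (winT t M i) - ((t[i]'(by omega)).toNat : Int) * ((256 ^ (M-1) : Int) % 101))
        + ((t[i+M]'(by omega)).toNat : Int)) 101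
      = pyHash (winT t M (i+1)) := by
  apply intEq_of_castEq
  · exact PySem.Int.mod_nonneg _ (by norm_num)
  · exact PySem.Int.mod_lt _ (by norm_num)
  · exact (pyHash_bounds' _).1
  · exact (pyHash_bounds' _).2
  · rw [castMod]
    push_cast
    rw [pyHash_cast, pyHash_cast, castEmod]
    rw [winT_cons t M i hM (by omega), winT_snoc t M i hM hi]
    rw [HZ_cons, HZ_append_singleton, len_mid t M i (by omega)]
    push_cast
    ring

theorem foldA (t p : List Char) (hM : 1 ≤ p.length) (hMN : p.length ≤ t.length)
    (k : Nat) (hk : k ≤ t.length - p.length + 1) :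
    (List.map (fun j : Nat => (j : Int)) (List.range k)).foldl
        (stepA t p (pyHash p) ((256 ^ (p.length - 1) : Int) % 101))
        (0, 0, 0, pyHash (winT t p.length 0))
      = (((List.range k).countP (fun i => decide (p = winT t p.length i)) : Int), (k:Int),
         ((List.range k).countP
            (fun i => decide (pyHash (winT t p.length i) = pyHash p ∧ ¬ p = winT t p.length i)) : Int),
         pyHash (winT t p.length (min k (t.length - p.length)))) := by
  induction k with
  | zero => simp
  | succ k ih =>
    rw [List.range_succ, List.map_append, List.foldl_append, ih (by omega)]
    simp only [List.map_cons, List.map_nil, List.foldl_cons, List.foldl_nil]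
    rw [Nat.min_eq_left (by omega)]
    simp only [stepA]
    rw [PySem.List.slice_natCast_add]
    have hwin : List.take p.length (List.drop k t) = winT t p.length k := rfl
    rw [hwin]
    have hnn := (pyHash_bounds' (winT t p.length (k+1))).1
    have hth :
        (if ((k:Int) + (p.length:Int) < (t.length:Int)) then
          (let th' := PySem.Int.mod
            (256 * (pyHash (winT t p.length k) - ((PySem.List.pyGetD t (k:Int) ' ').toNat : Int) * ((256 ^ (p.length - 1) : Int) % 101)) +
              ((PySem.List.pyGetD t ((k:Int) + (p.length:Int)) ' ').toNat : Int)) 101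
          if th' < 0 then th' + 101 else th')
        else pyHash (winT t p.length k))
        = pyHash (winT t p.length (min (k+1) (t.length - p.length))) := by
      by_cases hg : k + p.length < t.length
      · rw [if_pos (by exact_mod_cast hg)]
        have h1 : PySem.List.pyGetD t (k:Int) ' ' = t[k]'(by omega) := by
          rw [PySem.List.pyGetD_natCast]; exact List.getD_eq_getElem _ _ (by omega)
        have h2 : PySem.List.pyGetD t ((k:Int)+(p.length:Int)) ' ' = t[k + p.length]'(by omega) := by
          rw [show ((k:Int)+(p.length:Int)) = ((k+p.length : Nat):Int) by push_cast; ring,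
            PySem.List.pyGetD_natCast]
          exact List.getD_eq_getElem _ _ (by omega)
        rw [h1, h2, rollStep t p.length k hM (by omega), Nat.min_eq_left (by omega)]
        simp only [if_neg (not_lt.mpr hnn)]
      · rw [if_neg (by exact_mod_cast hg), Nat.min_eq_right (by omega),
          show t.length - p.length = k by omega]
    rw [hth]
    by_cases hs : p = winT t p.length k
    · have hh : pyHash (winT t p.length k) = pyHash p := congrArg pyHash hs.symm
      have hc : ¬(pyHash (winT t p.length k) = pyHash p ∧ ¬ p = winT t p.length k) :=
        fun hx => hx.2 hs
      simp only [if_pos hh, List.countP_append, List.countP_cons, List.countP_nil,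
        decide_eq_true_eq, if_pos hs, if_neg hc, Prod.mk.injEq]
      refine ⟨by push_cast; ring, by push_cast; ring, by push_cast; ring, trivial⟩
    · by_cases hh : pyHash (winT t p.length k) = pyHash p
      · have hc : pyHash (winT t p.length k) = pyHash p ∧ ¬ p = winT t p.length k := ⟨hh, hs⟩
        simp only [if_pos hh, if_neg hs, List.countP_append, List.countP_cons, List.countP_nil,
          decide_eq_true_eq, if_pos hc, Prod.mk.injEq]
        refine ⟨by push_cast; ring, by push_cast; ring, by push_cast; ring, trivial⟩
      · have hc : ¬(pyHash (winT t p.length k) = pyHash p ∧ ¬ p = winT t p.length k) :=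
          fun hx => hh hx.1
        simp only [if_neg hh, if_neg hs, List.countP_append, List.countP_cons, List.countP_nil,
          decide_eq_true_eq, if_neg hc, Prod.mk.injEq]
        refine ⟨by push_cast; ring, by push_cast; ring, by push_cast; ring, trivial⟩

theorem foldB (t p : List Char) (hM : 1 ≤ p.length) (hMN : p.length ≤ t.length)
    (k : Nat) (hk : k ≤ t.length - p.length + 1) :
    (List.map (fun j : Nat => (j : Int)) (List.range k)).foldl
        (stepB t (p.length : Int) (pyHash p) ((256 ^ (p.length - 1) : Int) % 101))
        (0, pyHash (winT t p.length 0))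
      = (((List.range k).countP (fun i => decide (pyHash (winT t p.length i) = pyHash p)) : Int),
         pyHash (winT t p.length (min k (t.length - p.length)))) := by
  induction k with
  | zero => simp
  | succ k ih =>
    rw [List.range_succ, List.map_append, List.foldl_append, ih (by omega)]
    simp only [List.map_cons, List.map_nil, List.foldl_cons, List.foldl_nil]
    rw [Nat.min_eq_left (by omega)]
    simp only [stepB]
    have hth :
        (if ((k:Int) + (p.length:Int) < (t.length:Int)) then
          PySem.Int.mod
            (256 * (pyHash (winT t p.length k) - ((PySem.List.pyGetD t (k:Int) ' ').toNat : Int) * ((256 ^ (p.length - 1) : Int) % 101)) +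
              ((PySem.List.pyGetD t ((k:Int) + (p.length:Int)) ' ').toNat : Int)) 101
        else pyHash (winT t p.length k))
        = pyHash (winT t p.length (min (k+1) (t.length - p.length))) := by
      by_cases hg : k + p.length < t.length
      · rw [if_pos (by exact_mod_cast hg)]
        have h1 : PySem.List.pyGetD t (k:Int) ' ' = t[k]'(by omega) := by
          rw [PySem.List.pyGetD_natCast]; exact List.getD_eq_getElem _ _ (by omega)
        have h2 : PySem.List.pyGetD t ((k:Int)+(p.length:Int)) ' ' = t[k + p.length]'(by omega) := by
          rw [show ((k:Int)+(p.length:Int)) = ((k+p.length : Nat):Int) by push_cast; ring,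
            PySem.List.pyGetD_natCast]
          exact List.getD_eq_getElem _ _ (by omega)
        rw [h1, h2, rollStep t p.length k hM (by omega), Nat.min_eq_left (by omega)]
      · rw [if_neg (by exact_mod_cast hg), Nat.min_eq_right (by omega),
          show t.length - p.length = k by omega]
    rw [hth]
    by_cases hh : pyHash (winT t p.length k) = pyHash p
    · simp only [if_pos hh, List.countP_append, List.countP_cons, List.countP_nil,
        decide_eq_true_eq, Prod.mk.injEq]
      refine ⟨by push_cast; ring, trivial⟩
    · simp only [if_neg hh, List.countP_append, List.countP_cons, List.countP_nil,
        decide_eq_true_eq, Prod.mk.injEq]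
      refine ⟨by push_cast; ring, trivial⟩

theorem hpow (K : Nat) :
    (PySem.List.pyRange 0 (K : Int)).foldl (fun hh _ => PySem.Int.mod (hh * 256) 101) 1
      = (256 ^ K : Int) % 101 := by
  induction K with
  | zero => decide
  | succ K ih =>
    rw [PySem.List.pyRange_zero_natCast] at *
    rw [List.range_succ, List.map_append, List.foldl_append, ih]
    simp only [List.map_cons, List.map_nil, List.foldl_cons, List.foldl_nil]
    rw [PySem.Int.mod_eq_emod_of_pos (by norm_num), pow_succ, Int.mul_emod (256 ^ K) 256]
    rw [show ((256:Int) % 101) = 256 % 101 from rfl]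
    conv_lhs => rw [← Int.emod_emod_of_dvd (256 ^ K) (dvd_refl (101:Int))]
    norm_num [Int.mul_emod]

theorem count_split (t p : List Char) (l : List Nat) :
    l.countP (fun i => decide (pyHash (winT t p.length i) = pyHash p))
      = l.countP (fun i => decide (p = winT t p.length i))
        + l.countP (fun i => decide (pyHash (winT t p.length i) = pyHash p ∧ ¬ p = winT t p.length i)) := by
  induction l with
  | nil => rfl
  | cons a l ih =>
    simp only [List.countP_cons, decide_eq_true_eq]
    by_cases hs : p = winT t p.length a
    · have hh : pyHash (winT t p.length a) = pyHash p := congrArg pyHash hs.symm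
      rw [if_pos hh, if_pos hs, if_neg (fun hx => hx.2 hs)]
      omega
    · by_cases hh : pyHash (winT t p.length a) = pyHash p
      · rw [if_pos hh, if_neg hs, if_pos ⟨hh, hs⟩]; omega
      · rw [if_neg hh, if_neg hs, if_neg (fun hx => hh hx.1)]; omega

theorem core_equiv (t p : List Char) (h : p ≠ [] ∨ t = []) :
    rolling_hash_comparison_core t p = rolling_hash_comparison_alt_core t p := by
  by_cases hp : p = []
  · -- then t = []
    have ht : t = [] := h.resolve_left (not_not.mpr hp)
    subst ht; subst hp; decide
  · have hM : 1 ≤ p.length := List.length_pos_iff.mpr hp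
    simp only [rolling_hash_comparison_core, rolling_hash_comparison_alt_core]
    have hm0 : ¬ ((p.length : Int) = 0) := by omega
    rw [if_neg hm0]
    by_cases hmn : t.length < p.length
    · -- no windows
      rw [if_pos (show ((t.length : Int) - (p.length : Int) + 1 ≤ 0) by omega)]
      rw [PySem.List.pyRange_one_eq_nil (show ((t.length : Int) - (p.length : Int) + 1 ≤ 0) by omega),
        List.foldl_nil]
    · have hMN : p.length ≤ t.length := by omega
      rw [if_neg (show ¬ ((t.length : Int) - (p.length : Int) + 1 ≤ 0) by omega)]
      -- normalize A's pieces
      have hW : ((t.length : Int) - (p.length : Int) + 1) = ((t.length - p.length + 1 : Nat) : Int) := by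
        push_cast [hMN]; omega
      have hA_h : (PySem.List.pyRange 0 ((p.length : Int) - 1)).foldl
          (fun hh _ => PySem.Int.mod (hh * 256) 101) 1 = (256 ^ (p.length - 1) : Int) % 101 := by
        rw [show ((p.length : Int) - 1) = ((p.length - 1 : Nat) : Int) by push_cast [hM]; omega]
        exact hpow _
      have hB_h : PySem.Int.powMod 256 (p.length - 1) 101 = (256 ^ (p.length - 1) : Int) % 101 :=
        PySem.Int.powMod_eq_emod 256 _ (by norm_num)
      have hsliceA : PySem.List.slice t (some 0) (some (p.length : Int)) = List.take p.length t := by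
        simp
      have hsliceB : PySem.List.slice t none (some (p.length : Int)) = List.take p.length t :=
        PySem.List.slice_to_natCast t p.length
      have hwin0 : List.take p.length t = winT t p.length 0 := by
        unfold winT; rw [List.drop_zero]
      have hBth0 : (List.take p.length t).foldl
          (fun a c => PySem.Int.mod (a * 256 + (c.toNat : Int)) 101) 0 = pyHash (winT t p.length 0) := by
        rw [hwin0]; rfl
      rw [hA_h, hB_h, hsliceA, hsliceB, hBth0, hwin0, hW, PySem.List.pyRange_zero_natCast]
      have hfa := foldA t p hM hMN (t.length - p.length + 1) le_rfl
      have hfb := foldB t p hM hMN (t.length - p.length + 1) le_rfl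
      rw [show (List.foldl (fun a c => PySem.Int.mod (a * 256 + (c.toNat : Int)) 101) 0 p)
        = pyHash p from rfl]
      rw [hfa, hfb]
      -- answers sum
      have hans : ((List.map (fun j : Nat => (j : Int)) (List.range (t.length - p.length + 1))).map
            (fun i => if PySem.List.slice t (some i) (some (i + (p.length : Int))) = p then (1 : Int) else 0)).sum
          = ((List.range (t.length - p.length + 1)).countP
              (fun i => decide (p = winT t p.length i)) : Int) := by
        rw [List.map_map]
        have : ((fun i => if PySem.List.slice t (some i) (some (i + (p.length : Int))) = p then (1 : Int) else 0)
            ∘ (fun j : Nat => (j : Int)))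
            = fun j : Nat => if (fun i => decide (p = winT t p.length i)) j = true then (1:Int) else 0 := by
          funext j
          simp only [Function.comp_apply, PySem.List.slice_natCast_add, decide_eq_true_eq]
          rw [show (List.take p.length (List.drop j t)) = winT t p.length j from rfl]
          by_cases hx : p = winT t p.length j
          · rw [if_pos (hx.symm), if_pos hx]
          · rw [if_neg (fun he => hx he.symm), if_neg hx]
        rw [this, PySem.List.sum_map_ite_one_zero]
      rw [hans]
      -- final list equality
      have hcnt := count_split t p (List.range (t.length - p.length + 1))
      simp only [List.cons.injEq, and_true]
      refine ⟨trivial, trivial, by omega⟩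

-- ===== VERDICT (by name: the statement is the Claim_ definition above) =====
theorem rolling_hash_comparison_spec : Claim_unchanged_rolling_hash_comparison := by
  intro text pattern _ hD
  unfold rolling_hash_comparison rolling_hash_comparison_alt
  apply core_equiv
  unfold D_rolling_hash_comparison at hD
  by_cases hp : pattern = ""
  · right
    rcases not_and_or.mp hD with h | h
    · exact absurd hp h
    · exact String.toList_eq_nil_iff.mpr (not_not.mp h)
  · left
    intro hnil
    exact hp (String.toList_eq_nil_iff.mp hnil)

theorem rolling_hash_comparison_changed : Claim_changed_rolling_hash_comparison := by
  unfold Claim_changed_rolling_hash_comparison; decide
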